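-- pv_equiv track=rewrite | github.com/Deign86/MATHPULSE-AI | backend/rag/curriculum_rag.py | organize_chunks_by_section
-- ===== SOURCE A (Python) =====
-- from typing import Dict, List, Optional, Tuple
--
-- def organize_chunks_by_section(chunks: list[dict]) -> Dict[str, List[dict]]:
--     """Organize retrieved chunks into lesson section categories."""
--     sections: Dict[str, List[dict]] = {
--         "introduction": [],
--         "key_concepts": [],
--         "worked_examples": [],
--         "important_notes": [],
--         "practice": [],
--         "summary": [],
--         "assessment": [],
--         "general": [],
--     }
--     domain_priority = {
--         "introduction": 1, "key_concepts": 2, "worked_examples": 3,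
--         "important_notes": 4, "practice": 5, "summary": 6,
--         "assessment": 7, "general": 8,
--     }
--     for chunk in chunks:
--         domain = chunk.get("content_domain", "general")
--         if domain in sections:
--             sections[domain].append(chunk)
--         else:
--             sections["general"].append(chunk)
--     return sections
-- ===== SOURCE B (Python) =====
-- from typing import Dict, List
--
-- _SECTION_NAMES = [
--     "introduction", "key_concepts", "worked_examples", "important_notes",
--     "practice", "summary", "assessment", "general",
-- ]
-- _KNOWN = set(_SECTION_NAMES)
--
-- def _section_of(chunk: dict) -> str:
--     domain = chunk.get("content_domain", "general")
--     return domain if domain in _KNOWN else "general"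
--
-- def organize_chunks_by_section(chunks: list) -> Dict[str, List[dict]]:
--     """Organize retrieved chunks into lesson section categories."""
--     return {name: [c for c in chunks if _section_of(c) == name]
--             for name in _SECTION_NAMES}
-- ===== Notes on version B (the rewrite author's own statement) =====
-- stated objective: simpler
-- what changed: Replaces the single-pass mutable-dict bucketing loop (with its unused domain_priority table) by a dict comprehension that builds each of the eight fixed buckets with an order-preserving filter over the chunk list.
import Mathlib
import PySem

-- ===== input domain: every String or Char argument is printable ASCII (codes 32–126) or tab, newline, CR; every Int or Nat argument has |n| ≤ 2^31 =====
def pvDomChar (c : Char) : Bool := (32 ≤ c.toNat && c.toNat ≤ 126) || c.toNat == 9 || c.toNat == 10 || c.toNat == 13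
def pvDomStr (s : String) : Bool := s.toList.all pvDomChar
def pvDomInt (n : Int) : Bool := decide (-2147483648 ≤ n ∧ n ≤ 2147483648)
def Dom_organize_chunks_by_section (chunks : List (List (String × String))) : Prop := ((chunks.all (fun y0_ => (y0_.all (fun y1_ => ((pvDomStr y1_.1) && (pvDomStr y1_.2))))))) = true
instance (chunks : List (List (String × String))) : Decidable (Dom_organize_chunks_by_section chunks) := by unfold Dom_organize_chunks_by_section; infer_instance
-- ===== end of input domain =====

-- B replaces A's single-pass mutable-dict bucketing (and unused domain_priority table) by a per-section filter comprehension over the fixed eight section names: simpler, same results.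


-- ===== PORT A =====
def organize_chunks_by_section (chunks : List (List (String × String))) : List (String × List (List (String × String))) :=
  let sections : PySem.Dict String (List (List (String × String))) :=
    PySem.Dict.mk [("introduction", []), ("key_concepts", []), ("worked_examples", []),
      ("important_notes", []), ("practice", []), ("summary", []), ("assessment", []), ("general", [])]
  -- domain_priority in the Python source is built and never used; it does not affect the result
  let final := chunks.foldl (fun d chunk =>
    let domain := (PySem.Dict.mk chunk).getD "content_domain" "general"
    if d.contains domain then d.modify domain [] (fun l => l ++ [chunk])
    else d.modify "general" [] (fun l => l ++ [chunk])) sections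
  final.items

-- ===== PORT B =====
def pvSectionNames : List String :=
  ["introduction", "key_concepts", "worked_examples", "important_notes",
   "practice", "summary", "assessment", "general"]

def pvSectionOf (chunk : List (String × String)) : String :=
  let domain := (PySem.Dict.mk chunk).getD "content_domain" "general"
  if pvSectionNames.contains domain then domain else "general"

def organize_chunks_by_section_alt (chunks : List (List (String × String))) : List (String × List (List (String × String))) :=
  pvSectionNames.map (fun name => (name, chunks.filter (fun c => pvSectionOf c == name)))

-- ===== PRECONDITION & SPEC =====
def Spec_organize_chunks_by_section (chunks : List (List (String × String))) (out : List (String × List (List (String × String)))) : Prop := out = organize_chunks_by_section_alt chunks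
instance (chunks : List (List (String × String))) (out : List (String × List (List (String × String)))) : Decidable (Spec_organize_chunks_by_section chunks out) := by unfold Spec_organize_chunks_by_section; infer_instance

-- ===== CLAIM (what is proved, stated in full; the proofs are below) =====
def Claim_equal_organize_chunks_by_section : Prop := ∀ (chunks : List (List (String × String))), Dom_organize_chunks_by_section chunks → Spec_organize_chunks_by_section chunks (organize_chunks_by_section chunks)

-- ===== LEMMAS AND PROOFS =====

-- proof-side name for A's initial dict and loop body (definitionally the port's)
def pvInit : PySem.Dict String (List (List (String × String))) :=
  PySem.Dict.mk [("introduction", []), ("key_concepts", []), ("worked_examples", []),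
    ("important_notes", []), ("practice", []), ("summary", []), ("assessment", []), ("general", [])]

def pvStep (d : PySem.Dict String (List (List (String × String))))
    (chunk : List (String × String)) : PySem.Dict String (List (List (String × String))) :=
  let domain := (PySem.Dict.mk chunk).getD "content_domain" "general"
  if d.contains domain then d.modify domain [] (fun l => l ++ [chunk])
  else d.modify "general" [] (fun l => l ++ [chunk])

theorem pvA_eq_foldl (chunks : List (List (String × String))) :
    organize_chunks_by_section chunks = (chunks.foldl pvStep pvInit).items := rfl

theorem pvSectionOf_mem (c : List (String × String)) : pvSectionOf c ∈ pvSectionNames := by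
  unfold pvSectionOf
  by_cases hm : ((PySem.Dict.mk c).getD "content_domain" "general") ∈ pvSectionNames
  · simp [List.contains_iff_mem.mpr hm, hm]
  · simp only [List.contains_iff_mem, hm, if_false]
    decide

theorem pvStep_eq (d : PySem.Dict String (List (List (String × String))))
    (c : List (String × String)) (h : d.keys = pvSectionNames) :
    pvStep d c = d.modify (pvSectionOf c) [] (fun l => l ++ [c]) := by
  simp only [pvStep, pvSectionOf, PySem.Dict.contains_eq_decide_mem_keys, h,
    List.contains_iff_mem]
  by_cases hm : ((PySem.Dict.mk c).getD "content_domain" "general") ∈ pvSectionNames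
  · simp [hm]
  · simp [hm]

theorem pvStep_keys (d : PySem.Dict String (List (List (String × String))))
    (c : List (String × String)) (h : d.keys = pvSectionNames) :
    (pvStep d c).keys = pvSectionNames := by
  rw [pvStep_eq d c h, PySem.Dict.keys_modify, PySem.Dict.keys_insert_of_contains]
  · exact h
  · rw [PySem.Dict.contains_eq_decide_mem_keys, h]
    simp [pvSectionOf_mem c]

theorem pvKeys_inv (chunks : List (List (String × String)))
    (d : PySem.Dict String (List (List (String × String)))) (h : d.keys = pvSectionNames) :
    (chunks.foldl pvStep d).keys = pvSectionNames := by
  induction chunks generalizing d with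
  | nil => exact h
  | cons c rest ih =>
    simp only [List.foldl_cons]
    exact ih _ (pvStep_keys d c h)

theorem pvGetD_inv (chunks : List (List (String × String)))
    (d : PySem.Dict String (List (List (String × String)))) (h : d.keys = pvSectionNames)
    (n : String) :
    (chunks.foldl pvStep d).getD n [] =
      d.getD n [] ++ chunks.filter (fun c => pvSectionOf c == n) := by
  induction chunks generalizing d with
  | nil => simp
  | cons c rest ih =>
    simp only [List.foldl_cons]
    rw [ih _ (pvStep_keys d c h), pvStep_eq d c h, PySem.Dict.getD_modify]
    by_cases hn : n = pvSectionOf c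
    · simp [hn]
    · have hb : (pvSectionOf c == n) = false := by
        simp [Ne.symm hn]
      simp [hn, hb]

theorem pvInit_getD (n : String) : pvInit.getD n [] = [] := by
  simp only [pvInit, PySem.Dict.getD_eq_get?_getD, PySem.Dict.get?_mk_cons]
  split_ifs <;> rfl

-- ===== VERDICT (by name: the statement is the Claim_ definition above) =====
theorem organize_chunks_by_section_spec : Claim_equal_organize_chunks_by_section := by
  intro chunks _
  show organize_chunks_by_section chunks = organize_chunks_by_section_alt chunks
  rw [pvA_eq_foldl]
  have hnd : pvSectionNames.Nodup := by decide
  have hkeys := pvKeys_inv chunks pvInit rfl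
  rw [PySem.Dict.items_eq_map_keys _ (hkeys ▸ hnd) ([] : List (List (String × String))), hkeys]
  simp only [organize_chunks_by_section_alt]
  refine List.map_congr_left (fun n _ => ?_)
  rw [pvGetD_inv chunks pvInit rfl n, pvInit_getD]
  rfl
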